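-- pv_equiv track=rewrite | github.com/NiXbi-L/Phrase-evaluator | Phrase_evaluator/Evaluator.py | sort_and_group_by_x
-- ===== SOURCE A (Python) =====
-- def sort_and_group_by_x(point_groups):
--     sort = {}
--     count_el = {}
--     for point_group in point_groups:
--         if point_group[0][0] in list(sort):
--             sort[point_group[0][0]].append(point_group)
--             count_el[point_group[0][0]] += 1
--         else:
--             sort[point_group[0][0]] = [point_group]
--             count_el[point_group[0][0]] = 1
--
--     return sort, count_el
-- ===== SOURCE B (Python) =====
-- def sort_and_group_by_x(point_groups):
--     keys = []
--     for g in point_groups: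
--         k = g[0][0]
--         if k not in keys:
--             keys.append(k)
--     sort = {k: [g for g in point_groups if g[0][0] == k] for k in keys}
--     count_el = {k: len(v) for k, v in sort.items()}
--     return sort, count_el
-- ===== Notes on version B (the rewrite author's own statement) =====
-- stated objective: simpler
-- what changed: A builds the grouping dict and a parallel counter dict in one branching loop with in-place appends; B first collects the distinct keys in first-occurrence order, then builds each group by a per-key filter over the input and derives the counts from the group lengths.
import Mathlib
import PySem

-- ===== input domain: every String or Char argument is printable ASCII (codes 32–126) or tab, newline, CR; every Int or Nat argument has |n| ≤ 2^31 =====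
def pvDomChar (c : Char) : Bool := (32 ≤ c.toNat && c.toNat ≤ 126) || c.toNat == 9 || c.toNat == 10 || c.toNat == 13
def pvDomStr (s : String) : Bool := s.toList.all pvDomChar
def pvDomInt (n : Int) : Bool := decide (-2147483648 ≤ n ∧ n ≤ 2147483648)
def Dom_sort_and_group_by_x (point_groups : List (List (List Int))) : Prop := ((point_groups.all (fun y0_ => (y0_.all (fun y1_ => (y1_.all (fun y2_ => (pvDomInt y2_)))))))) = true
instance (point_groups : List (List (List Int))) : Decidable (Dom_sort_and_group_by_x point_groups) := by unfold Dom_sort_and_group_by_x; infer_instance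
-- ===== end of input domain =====

-- B replaces A's single-pass dict/counter loop by a key-dedup pass plus a per-key filter pass,
-- deriving the counts from the group lengths (objective: simpler decomposition, not faster).

-- key expression point_group[0][0] (shared by both ports; none = IndexError)
def pvKey (g : List (List Int)) : Option Int :=
  (PySem.List.pyGet? g 0).bind (fun r => PySem.List.pyGet? r 0)

-- ===== PORT A =====
def sort_and_group_by_x (point_groups : List (List (List Int))) : (List (Int × List (List (List Int)))) × (List (Int × Int)) :=
  let st := point_groups.foldl
    (fun (st : PySem.Dict Int (List (List (List Int))) × PySem.Dict Int Int) pg =>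
      match pvKey pg with
      | none => st            -- Python raises IndexError here; excluded by Pre_
      | some k =>
        if st.1.contains k then
          (st.1.modify k [] (· ++ [pg]), st.2.modify k 0 (· + 1))
        else
          (st.1.insert k [pg], st.2.insert k 1))
    (PySem.Dict.empty, PySem.Dict.empty)
  (st.1.items, st.2.items)

-- ===== PORT B =====
def sort_and_group_by_x_alt (point_groups : List (List (List Int))) : (List (Int × List (List (List Int)))) × (List (Int × Int)) :=
  let keys := point_groups.foldl
    (fun (ks : List Int) g =>
      match pvKey g with
      | none => ks            -- Python raises IndexError here; excluded by Pre_
      | some k => if k ∈ ks then ks else ks ++ [k])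
    []
  let srt := keys.map (fun k => (k, point_groups.filter (fun g => pvKey g == some k)))
  (srt, srt.map (fun p => (p.1, PySem.List.len p.2)))

-- ===== PRECONDITION & SPEC =====
-- Pre_ excludes exactly the inputs where point_group[0][0] raises IndexError in A (and in B):
-- some point group is empty or its first point is empty.
def Pre_sort_and_group_by_x (point_groups : List (List (List Int))) : Prop :=
  ∀ pg ∈ point_groups, pg ≠ [] ∧ pg.headI ≠ ([] : List Int)
instance (point_groups : List (List (List Int))) : Decidable (Pre_sort_and_group_by_x point_groups) := by unfold Pre_sort_and_group_by_x; infer_instance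

def pvWitness_sort_and_group_by_x : List (List (List Int)) := [[[1, 2]], [[2], [0, 0]], [[1, 5]]]

def Spec_sort_and_group_by_x (point_groups : List (List (List Int))) (out : (List (Int × List (List (List Int)))) × (List (Int × Int))) : Prop := out = sort_and_group_by_x_alt point_groups
instance (point_groups : List (List (List Int))) (out : (List (Int × List (List (List Int)))) × (List (Int × Int))) : Decidable (Spec_sort_and_group_by_x point_groups out) := by unfold Spec_sort_and_group_by_x; infer_instance

-- ===== CLAIM (what is proved, stated in full; the proofs are below) =====
def Claim_equal_sort_and_group_by_x : Prop := ∀ (point_groups : List (List (List Int))), Dom_sort_and_group_by_x point_groups → Pre_sort_and_group_by_x point_groups → Spec_sort_and_group_by_x point_groups (sort_and_group_by_x point_groups)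

-- ===== LEMMAS AND PROOFS =====

-- the key value under Pre_ (total form used by the proofs only)
def pvKf (g : List (List Int)) : Int := (pvKey g).getD 0

theorem pvKey_eq_some {g : List (List Int)} (h1 : g ≠ []) (h2 : g.headI ≠ ([] : List Int)) :
    pvKey g = some (pvKf g) := by
  match g, h1 with
  | a :: t, _ =>
    match a, h2 with
    | b :: u, _ => simp [pvKey, pvKf]

-- eliminate the `match pvKey g` in a fold when all keys exist
theorem foldl_match_eq {β : Type} (F : β → List (List Int) → Int → β)
    (pgs : List (List (List Int))) (h : ∀ g ∈ pgs, pvKey g = some (pvKf g)) (init : β) :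
    pgs.foldl (fun st g => match pvKey g with | none => st | some k => F st g k) init
      = pgs.foldl (fun st g => F st g (pvKf g)) init := by
  induction pgs generalizing init with
  | nil => rfl
  | cons a t ih =>
    simp only [List.foldl_cons, h a (List.mem_cons_self)]
    exact ih (fun g hg => h g (List.mem_cons_of_mem a hg)) _

-- modify on a missing key is insert of f applied to the default
theorem dict_modify_not_contains {κ ν : Type} [BEq κ] [LawfulBEq κ]
    (d : PySem.Dict κ ν) (k : κ) (d0 : ν) (f : ν → ν) (h : d.contains k = false) :
    d.modify k d0 f = d.insert k (f d0) := by
  simp [PySem.Dict.modify, PySem.Dict.insert, h, PySem.Dict.getD_of_not_contains d d0 h]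

-- A's branching loop is two independent modify-loops
theorem foldA_eq (pgs : List (List (List Int)))
    (s : PySem.Dict Int (List (List (List Int)))) (c : PySem.Dict Int Int)
    (hsc : ∀ x, s.contains x = c.contains x) :
    pgs.foldl
      (fun (st : PySem.Dict Int (List (List (List Int))) × PySem.Dict Int Int) pg =>
        if st.1.contains (pvKf pg) then
          (st.1.modify (pvKf pg) [] (· ++ [pg]), st.2.modify (pvKf pg) 0 (· + 1))
        else
          (st.1.insert (pvKf pg) [pg], st.2.insert (pvKf pg) 1)) (s, c)
      = (pgs.foldl (fun d g => d.modify (pvKf g) [] (· ++ [g])) s,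
         pgs.foldl (fun d g => d.modify (pvKf g) 0 (· + 1)) c) := by
  induction pgs generalizing s c with
  | nil => rfl
  | cons a t ih =>
    simp only [List.foldl_cons]
    by_cases hc : s.contains (pvKf a) = true
    · rw [if_pos hc]
      exact ih _ _ (fun x => by simp [PySem.Dict.contains_modify, hsc x])
    · rw [if_neg hc,
        dict_modify_not_contains s (pvKf a) [] (· ++ [a]) (by simpa using hc),
        dict_modify_not_contains c (pvKf a) 0 (· + 1) (by rw [← hsc]; simpa using hc)]
      norm_num
      exact ih _ _ (fun x => by simp [PySem.Dict.contains_insert, hsc x])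

-- ===== VERDICT (by name: the statement is the Claim_ definition above) =====
theorem sort_and_group_by_x_spec : Claim_equal_sort_and_group_by_x := by
  intro pgs _ hpre
  unfold Spec_sort_and_group_by_x
  have hk : ∀ g ∈ pgs, pvKey g = some (pvKf g) :=
    fun g hg => pvKey_eq_some (hpre g hg).1 (hpre g hg).2
  simp only [sort_and_group_by_x, sort_and_group_by_x_alt]
  rw [foldl_match_eq (fun (st : PySem.Dict Int (List (List (List Int))) × PySem.Dict Int Int) pg k =>
      if st.1.contains k then
        (st.1.modify k [] (· ++ [pg]), st.2.modify k 0 (· + 1))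
      else
        (st.1.insert k [pg], st.2.insert k 1)) pgs hk,
    foldl_match_eq (fun (ks : List Int) g k => if k ∈ ks then ks else ks ++ [k]) pgs hk,
    foldA_eq pgs _ _ (fun x => rfl)]
  -- characterize A's two dicts
  have hS := List.foldl_map (f := fun g : List (List Int) => (pvKf g, g))
    (g := fun (d : PySem.Dict Int (List (List (List Int)))) (p : Int × List (List Int)) => d.modify p.1 [] (· ++ [p.2]))
    (l := pgs) (init := PySem.Dict.empty)
  simp only at hS
  have hC := List.foldl_map (f := pvKf)
    (g := fun (d : PySem.Dict Int Int) (x : Int) => d.modify x 0 (· + 1))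
    (l := pgs) (init := PySem.Dict.empty)
  simp only at hC
  have hgetDS : ∀ k, (pgs.foldl (fun d g => d.modify (pvKf g) [] (· ++ [g]))
      (PySem.Dict.empty : PySem.Dict Int (List (List (List Int))))).getD k []
      = pgs.filter (fun g => pvKf g == k) := by
    intro k
    rw [← hS, PySem.Dict.getD_foldl_modify_append]
    simp [List.filter_map, Function.comp_def]
  have hgetDC : ∀ k, (pgs.foldl (fun d g => d.modify (pvKf g) 0 (· + 1))
      (PySem.Dict.empty : PySem.Dict Int Int)).getD k 0
      = ((pgs.filter (fun g => pvKf g == k)).length : Int) := by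
    intro k
    rw [← hC, PySem.Dict.getD_foldl_modify_add_one]
    simp [List.count_eq_countP, List.countP_eq_length_filter, List.filter_map, Function.comp_def]
  have hkeysS : (pgs.foldl (fun d g => d.modify (pvKf g) [] (· ++ [g]))
      (PySem.Dict.empty : PySem.Dict Int (List (List (List Int))))).keys
      = PySem.Set.ofList (pgs.map pvKf) := by
    rw [PySem.Dict.keys_foldl_modify_key, PySem.Dict.keys_empty, PySem.Set.update_nil_left]
  have hkeysC : (pgs.foldl (fun d g => d.modify (pvKf g) 0 (· + 1))
      (PySem.Dict.empty : PySem.Dict Int Int)).keys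
      = PySem.Set.ofList (pgs.map pvKf) := by
    rw [PySem.Dict.keys_foldl_modify_key, PySem.Dict.keys_empty, PySem.Set.update_nil_left]
  have hndS : (pgs.foldl (fun d g => d.modify (pvKf g) [] (· ++ [g]))
      (PySem.Dict.empty : PySem.Dict Int (List (List (List Int))))).keys.Nodup := by
    rw [hkeysS]; exact PySem.Set.nodup_ofList _
  have hndC : (pgs.foldl (fun d g => d.modify (pvKf g) 0 (· + 1))
      (PySem.Dict.empty : PySem.Dict Int Int)).keys.Nodup := by
    rw [hkeysC]; exact PySem.Set.nodup_ofList _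
  -- B's key list is the same deduplicated key list
  have hupd := PySem.Set.update_map_eq_foldl_add (s := ([] : List Int)) (l := pgs) (f := pvKf)
  have hB : pgs.foldl (fun (ks : List Int) g => if pvKf g ∈ ks then ks else ks ++ [pvKf g]) []
      = PySem.Set.ofList (pgs.map pvKf) := by
    rw [← PySem.Set.update_nil_left, hupd]
    simp only [PySem.Set.add_eq_ite]
  -- B's filter predicate agrees with pvKf on members of pgs
  have hfil : ∀ k : Int, pgs.filter (fun g => pvKey g == some k) = pgs.filter (fun g => pvKf g == k) := by
    intro k
    apply List.filter_congr
    intro g hg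
    rw [hk g hg]
    simp
  rw [PySem.Dict.items_eq_map_keys _ hndS ([] : List (List (List Int))),
    PySem.Dict.items_eq_map_keys _ hndC (0 : Int), hkeysS, hkeysC, hB]
  simp only [List.map_map]
  rw [Prod.mk.injEq]
  refine ⟨?_, ?_⟩
  · apply List.map_congr_left
    intro k _
    rw [hgetDS k, hfil k]
  · apply List.map_congr_left
    intro k _
    simp only [Function.comp_def, hgetDC k, hfil k, PySem.List.len_eq]
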